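-- pv_equiv track=rewrite | github.com/kau96kim/ENGG_1202 | assignment_1/Assignment 1, programming part 1_ Affine Cipher/affine.py | afencode
-- ===== SOURCE A (Python) =====
-- def afencode (c, a, b):
--     ans="";
--     for t in c:
--         if (ord( t ) >= ord( 'a' ) and ord( t ) <= ord( 'z' )):
--             num = (a*(ord(t)-ord('a'))+b)%26;
--             ans += chr(num+ord('a'));
--         elif (ord( t ) >= ord( 'A' ) and ord( t ) <= ord( 'Z' )):
--             num = (a*(ord(t)-ord('A'))+b)%26;
--             ans += chr(num+ord('A'));
--         else:
--             ans += t;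
--     return ans;
-- ===== SOURCE B (Python) =====
-- def afencode(c, a, b):
--     table = {}
--     for base in (97, 65):
--         for i in range(26):
--             table[base + i] = chr(base + (a * i + b) % 26)
--     return c.translate(table)
-- ===== Notes on version B (the rewrite author's own statement) =====
-- stated objective: idiomatic
-- what changed: Builds the 52-entry affine translation table once by looping over the alphabet, then applies it in one str.translate pass instead of per-character if/elif branching and string concatenation over the input.
import Mathlib
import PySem

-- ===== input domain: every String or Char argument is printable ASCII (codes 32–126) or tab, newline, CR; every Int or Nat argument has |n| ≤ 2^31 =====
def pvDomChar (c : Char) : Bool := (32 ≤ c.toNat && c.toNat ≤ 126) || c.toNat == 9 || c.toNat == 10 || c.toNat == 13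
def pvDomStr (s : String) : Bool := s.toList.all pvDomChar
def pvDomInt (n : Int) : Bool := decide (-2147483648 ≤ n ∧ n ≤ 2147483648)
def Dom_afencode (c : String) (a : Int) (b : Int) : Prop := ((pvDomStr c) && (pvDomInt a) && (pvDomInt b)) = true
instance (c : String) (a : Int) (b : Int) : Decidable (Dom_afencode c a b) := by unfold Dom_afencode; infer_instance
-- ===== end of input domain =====

-- B builds the 52-entry affine translation table once over the alphabet and applies it
-- in a single translate pass, instead of A's per-character if/elif branching.

-- ===== PORT A =====
-- A: scan the input, branch per character, append to the accumulated answer string.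
def afencode (c : String) (a : Int) (b : Int) : String :=
  String.ofList (c.toList.foldl (fun ans t =>
    if 97 ≤ t.toNat ∧ t.toNat ≤ 122 then
      ans ++ [Char.ofNat ((PySem.Int.mod (a * ((t.toNat : Int) - 97) + b) 26) + 97).toNat]
    else if 65 ≤ t.toNat ∧ t.toNat ≤ 90 then
      ans ++ [Char.ofNat ((PySem.Int.mod (a * ((t.toNat : Int) - 65) + b) 26) + 65).toNat]
    else ans ++ [t]) [])

-- ===== PORT B =====
-- the translation table: for base in (97, 65): for i in range(26): table[base+i] = chr(base + (a*i+b)%26)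
def afTable (a : Int) (b : Int) : PySem.Dict Int Char :=
  [(97 : Int), 65].foldl (fun d base =>
    (PySem.List.pyRange 0 26 1).foldl (fun d i =>
      d.insert (base + i) (Char.ofNat (base + PySem.Int.mod (a * i + b) 26).toNat)) d)
    PySem.Dict.empty

-- c.translate(table): each codepoint present in the table is replaced by its (1-char) value,
-- absent codepoints are kept — exact for this table, whose values are single chars.
def afencode_alt (c : String) (a : Int) (b : Int) : String :=
  String.ofList (c.toList.map (fun t => ((afTable a b).get? (t.toNat : Int)).getD t))

-- ===== PRECONDITION & SPEC =====
def Spec_afencode (c : String) (a : Int) (b : Int) (out : String) : Prop := out = afencode_alt c a b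
instance (c : String) (a : Int) (b : Int) (out : String) : Decidable (Spec_afencode c a b out) := by unfold Spec_afencode; infer_instance

-- ===== CLAIM (what is proved, stated in full; the proofs are below) =====
def Claim_equal_afencode : Prop := ∀ (c : String) (a : Int) (b : Int), Dom_afencode c a b → Spec_afencode c a b (afencode c a b)

-- ===== LEMMAS AND PROOFS =====

-- lookup after inserting keys base+i for i ∈ range(lo, lo+n) into d
theorem get?_foldl_insert_range (n : Nat) (lo base : Int) (v : Int → Char)
    (d : PySem.Dict Int Char) (x : Int) :
    ((PySem.List.pyRange lo (lo + n) 1).foldl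
        (fun d i => d.insert (base + i) (v i)) d).get? x
      = if base + lo ≤ x ∧ x < base + lo + n then some (v (x - base)) else d.get? x := by
  induction n generalizing lo d with
  | zero =>
      rw [PySem.List.pyRange_one_eq_nil (by omega)]
      simp only [List.foldl_nil]
      rw [if_neg (by omega)]
  | succ n ih =>
      rw [PySem.List.pyRange_one_cons (by push_cast; omega)]
      have h1 : lo + (↑(n + 1) : Int) = (lo + 1) + (n : Int) := by push_cast; ring
      rw [h1]
      simp only [List.foldl_cons]
      rw [ih]
      by_cases hx : base + (lo + 1) ≤ x ∧ x < base + (lo + 1) + n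
      · rw [if_pos hx, if_pos (by omega)]
      · rw [if_neg hx, PySem.Dict.get?_insert]
        by_cases he : x = base + lo
        · have hxb : x - base = lo := by omega
          rw [if_pos he, if_pos (by omega), hxb]
        · rw [if_neg he, if_neg (by omega)]

theorem afTable_get? (a b : Int) (x : Int) :
    (afTable a b).get? x
      = if 65 ≤ x ∧ x < 91 then
          some (Char.ofNat (65 + PySem.Int.mod (a * (x - 65) + b) 26).toNat)
        else if 97 ≤ x ∧ x < 123 then
          some (Char.ofNat (97 + PySem.Int.mod (a * (x - 97) + b) 26).toNat)
        else none := by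
  unfold afTable
  simp only [List.foldl_cons, List.foldl_nil]
  have h26 : (26 : Int) = ((26 : Nat) : Int) := by norm_num
  have hr : ∀ (base : Int) (d : PySem.Dict Int Char),
      ((PySem.List.pyRange 0 26 1).foldl
        (fun d i => d.insert (base + i) (Char.ofNat (base + PySem.Int.mod (a * i + b) 26).toNat)) d).get? x
      = if base ≤ x ∧ x < base + 26 then
          some (Char.ofNat (base + PySem.Int.mod (a * (x - base) + b) 26).toNat)
        else d.get? x := by
    intro base d
    have := get?_foldl_insert_range 26 0 base
      (fun i => Char.ofNat (base + PySem.Int.mod (a * i + b) 26).toNat) d x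
    rw [show (0 : Int) + ((26 : Nat) : Int) = 26 by norm_num] at this
    rw [this]
    by_cases h : base ≤ x ∧ x < base + 26
    · rw [if_pos (by push_cast; omega), if_pos h]
    · rw [if_neg (by push_cast; omega), if_neg h]
  rw [hr, hr]
  by_cases hu : 65 ≤ x ∧ x < 91
  · rw [if_pos (by omega), if_pos hu]
  · rw [if_neg (by omega), if_neg hu]
    by_cases hl : 97 ≤ x ∧ x < 123
    · rw [if_pos (by omega), if_pos hl]
    · rw [if_neg (by omega), if_neg hl]
      exact PySem.Dict.get?_empty x

-- A's loop body as a per-character function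
def afStep (a : Int) (b : Int) (t : Char) : Char :=
  if 97 ≤ t.toNat ∧ t.toNat ≤ 122 then
    Char.ofNat ((PySem.Int.mod (a * ((t.toNat : Int) - 97) + b) 26) + 97).toNat
  else if 65 ≤ t.toNat ∧ t.toNat ≤ 90 then
    Char.ofNat ((PySem.Int.mod (a * ((t.toNat : Int) - 65) + b) 26) + 65).toNat
  else t

-- per-character agreement of the two programs
theorem char_agree (a b : Int) (t : Char) :
    afStep a b t = ((afTable a b).get? (t.toNat : Int)).getD t := by
  rw [afTable_get?]
  unfold afStep
  split_ifs with h1 h2 h3 h4 h5 <;>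
    first
      | rfl
      | (exfalso; omega)
      | (simp only [Option.getD_some]; congr 1; rw [Int.add_comm])

-- ===== VERDICT (by name: the statement is the Claim_ definition above) =====
theorem afencode_spec : Claim_equal_afencode := by
  intro c a b _
  unfold Spec_afencode afencode afencode_alt
  congr 1
  have hbody : (fun (ans : List Char) (t : Char) =>
      if 97 ≤ t.toNat ∧ t.toNat ≤ 122 then
        ans ++ [Char.ofNat ((PySem.Int.mod (a * ((t.toNat : Int) - 97) + b) 26) + 97).toNat]
      else if 65 ≤ t.toNat ∧ t.toNat ≤ 90 then
        ans ++ [Char.ofNat ((PySem.Int.mod (a * ((t.toNat : Int) - 65) + b) 26) + 65).toNat]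
      else ans ++ [t]) = fun ans t => ans ++ [afStep a b t] := by
    funext ans t
    unfold afStep
    split_ifs <;> rfl
  rw [hbody, PySem.List.foldl_append_singleton_eq_map]
  exact List.map_congr_left (fun t _ => char_agree a b t)
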